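-- pv_equiv track=rewrite | github.com/tsuru7/algorithm-study | AtCoder/others/AISING/D.py | makeFtbl
-- ===== SOURCE A (Python) =====
-- def popcount(n):
--     binn=bin(n)
--     return binn.count('1')
--
-- def makeFtbl(n):
--     Ftbl=[0]*(n+1)
--     Ftbl[1]=1
--     Ftbl[2]=1
--     for i in range(3,n+1):
--         m=i%popcount(i)
--         Ftbl[i]=Ftbl[m]+1
--     return Ftbl
-- ===== SOURCE B (Python) =====
-- def makeFtbl(n):
--     def chain_len(i):
--         c = 0
--         while i:
--             i %= bin(i).count('1')
--             c += 1
--         return c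
--     return [chain_len(i) for i in range(n + 1)]
-- ===== Notes on version B (the rewrite author's own statement) =====
-- stated objective: alternative
-- what changed: Replaces the memoized DP table (each entry read back from earlier entries) with a list comprehension computing every entry independently by walking its popcount-mod chain down to 0.
import Mathlib
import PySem

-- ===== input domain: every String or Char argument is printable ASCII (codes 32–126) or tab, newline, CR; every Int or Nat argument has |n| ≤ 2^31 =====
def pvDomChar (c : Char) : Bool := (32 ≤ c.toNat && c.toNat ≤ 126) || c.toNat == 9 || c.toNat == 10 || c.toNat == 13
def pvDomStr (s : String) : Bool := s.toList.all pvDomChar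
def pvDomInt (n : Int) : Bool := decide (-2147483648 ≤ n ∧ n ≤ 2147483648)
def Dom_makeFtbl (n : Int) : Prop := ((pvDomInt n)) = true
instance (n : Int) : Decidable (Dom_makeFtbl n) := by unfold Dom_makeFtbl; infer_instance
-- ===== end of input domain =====

-- B replaces A's memoized DP table by independent per-entry popcount-mod chain walks (alternative decomposition, similar cost).

-- ===== PORT A =====
-- popcount(n) = bin(n).count('1') — exactly PySem.Int.bitCount (reads |n|, like bin's digits)
def popcountA (n : Int) : Int := (PySem.Int.bitCount n : Int)

def makeFtbl (n : Int) : List Int :=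
  let Ftbl := List.replicate (n + 1).toNat (0 : Int)
  let Ftbl := PySem.List.pySetD Ftbl 1 1
  let Ftbl := PySem.List.pySetD Ftbl 2 1
  (PySem.List.pyRange 3 (n + 1) 1).foldl
    (fun F i =>
      let m := PySem.Int.mod i (popcountA i)
      PySem.List.pySetD F i (PySem.List.pyGetD F m 0 + 1)) Ftbl

-- ===== PORT B =====
-- termination facts for the while-loop: popcount of a positive number is positive and ≤ the number
theorem bc_pos (j : Nat) (h : j ≠ 0) : 0 < PySem.Int.bitCount (j : Int) := by
  induction j using Nat.strong_induction_on with
  | _ j ih =>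
    rw [PySem.Int.bitCount_natCast (by omega : 0 < j)]
    by_cases h2 : j % 2 = 1
    · omega
    · have hj2 : j / 2 ≠ 0 := by omega
      have := ih (j / 2) (Nat.div_lt_self (by omega) (by omega)) hj2
      omega

theorem bc_le (j : Nat) : PySem.Int.bitCount (j : Int) ≤ j := by
  induction j using Nat.strong_induction_on with
  | _ j ih =>
    rcases Nat.eq_zero_or_pos j with h | h
    · subst h; simp [PySem.Int.bitCount_zero]
    · rw [PySem.Int.bitCount_natCast h]
      have hlt : j / 2 < j := Nat.div_lt_self h (by omega)
      have := ih (j / 2) hlt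
      omega

theorem chain_dec (j : Nat) (h : ¬ j = 0) : j % PySem.Int.bitCount (j : Int) < j :=
  Nat.lt_of_lt_of_le (Nat.mod_lt _ (bc_pos j h)) (bc_le j)

-- the body of chain_len: while i: i %= bin(i).count('1'); c += 1
def chainLen (j : Nat) (c : Int) : Int :=
  if h : j = 0 then c
  else chainLen (j % PySem.Int.bitCount (j : Int)) (c + 1)
termination_by j
decreasing_by exact chain_dec j h

def makeFtbl_alt (n : Int) : List Int :=
  (PySem.List.pyRange 0 (n + 1) 1).map (fun i => chainLen i.toNat 0)

-- ===== PRECONDITION & SPEC =====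
-- Pre_ excludes exactly the inputs on which A raises IndexError at its two seed assignments (tables too short to hold them).
def Pre_makeFtbl (n : Int) : Prop := 2 ≤ n
instance (n : Int) : Decidable (Pre_makeFtbl n) := by unfold Pre_makeFtbl; infer_instance

def pvWitness_makeFtbl : Int := 7

def Spec_makeFtbl (n : Int) (out : List Int) : Prop := out = makeFtbl_alt n
instance (n : Int) (out : List Int) : Decidable (Spec_makeFtbl n out) := by unfold Spec_makeFtbl; infer_instance

-- ===== CLAIM (what is proved, stated in full; the proofs are below) =====
def Claim_equal_makeFtbl : Prop := ∀ (n : Int), Dom_makeFtbl n → Pre_makeFtbl n → Spec_makeFtbl n (makeFtbl n)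

-- ===== LEMMAS AND PROOFS =====

-- chainLen with accumulator c equals chainLen with accumulator 0, plus c
theorem chainLen_zero (c : Int) : chainLen 0 c = c := by
  rw [chainLen.eq_def]; simp

theorem chainLen_step (j : Nat) (c : Int) (h : j ≠ 0) :
    chainLen j c = chainLen (j % PySem.Int.bitCount (j : Int)) (c + 1) := by
  rw [chainLen.eq_def]; simp [h]

theorem chainLen_shift (j : Nat) : ∀ c : Int, chainLen j c = chainLen j 0 + c := by
  induction j using Nat.strong_induction_on with
  | _ j ih =>
    intro c
    by_cases h : j = 0
    · subst h; simp [chainLen_zero]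
    · rw [chainLen_step j c h, chainLen_step j 0 h,
          ih _ (chain_dec j h) (c + 1), ih _ (chain_dec j h) (0 + 1)]
      ring

-- abbreviation for A's fold step
def stepA (F : List Int) (i : Int) : List Int :=
  PySem.List.pySetD F i (PySem.List.pyGetD F (PySem.Int.mod i (popcountA i)) 0 + 1)

theorem makeFtbl_eq_fold (n : Int) :
    makeFtbl n = (PySem.List.pyRange 3 (n + 1) 1).foldl stepA
      (PySem.List.pySetD (PySem.List.pySetD (List.replicate (n + 1).toNat (0 : Int)) 1 1) 2 1) := rfl

-- m = i % popcount(i) satisfies 0 ≤ m < i for i ≥ 1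
theorem modpc_bounds (i : Int) (h : 1 ≤ i) :
    0 ≤ PySem.Int.mod i (popcountA i) ∧ PySem.Int.mod i (popcountA i) < i := by
  have h0 : i = ((i.toNat : Nat) : Int) := by omega
  have hne : i.toNat ≠ 0 := by omega
  have hpos : (0 : Int) < popcountA i := by
    unfold popcountA; rw [h0]; exact_mod_cast bc_pos i.toNat hne
  have hle : popcountA i ≤ i := by
    unfold popcountA
    calc (PySem.Int.bitCount i : Int) = (PySem.Int.bitCount ((i.toNat : Nat) : Int) : Int) := by rw [← h0]
      _ ≤ ((i.toNat : Nat) : Int) := by exact_mod_cast bc_le i.toNat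
      _ = i := by omega
  exact ⟨PySem.Int.mod_nonneg _ hpos, lt_of_lt_of_le (PySem.Int.mod_lt _ hpos) hle⟩

theorem length_stepA (F : List Int) (i : Int) : (stepA F i).length = F.length := by
  simp [stepA, PySem.List.length_pySetD]

-- a step at an in-range index only touches the prefix: stepA (F ++ G) i = stepA F i ++ G
theorem stepA_append (F G : List Int) (i : Int) (h3 : 3 ≤ i) (hlt : i < (F.length : Int)) :
    stepA (F ++ G) i = stepA F i ++ G := by
  obtain ⟨hm0, hmi⟩ := modpc_bounds i (by omega)
  unfold stepA
  have hget : PySem.List.pyGetD (F ++ G) (PySem.Int.mod i (popcountA i)) 0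
      = PySem.List.pyGetD F (PySem.Int.mod i (popcountA i)) 0 := by
    rw [PySem.List.pyGetD_of_nonneg _ _ hm0, PySem.List.pyGetD_of_nonneg _ _ hm0]
    have hmF : (PySem.Int.mod i (popcountA i)).toNat < F.length := by omega
    simp [List.getD_eq_getElem?_getD, List.getElem?_append_left hmF]
  rw [hget]
  rw [PySem.List.pySetD_of_nonneg _ _ (by omega : (0:Int) ≤ i),
      PySem.List.pySetD_of_nonneg _ _ (by omega : (0:Int) ≤ i)]
  rw [List.set_append]
  have hiF : i.toNat < F.length := by omega
  rw [if_pos hiF]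

-- folding over indices all within F only touches the prefix
theorem foldl_stepA_append (l : List Int) : ∀ (F G : List Int),
    (∀ i ∈ l, 3 ≤ i ∧ i < (F.length : Int)) →
    l.foldl stepA (F ++ G) = l.foldl stepA F ++ G := by
  induction l with
  | nil => intro F G _; rfl
  | cons x l ih =>
    intro F G hb
    obtain ⟨hx3, hxl⟩ := hb x (by simp)
    rw [List.foldl_cons, List.foldl_cons, stepA_append F G x hx3 hxl]
    exact ih (stepA F x) G (fun i hi => by
      have := hb i (by simp [hi])
      rw [length_stepA]; exact this)

-- the initial table of size M (M ≥ 3), as a Nat-indexed list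
def initN (M : Nat) : List Int := ((List.replicate M (0 : Int)).set 1 1).set 2 1

theorem initN_succ (M : Nat) (h : 3 ≤ M) : initN (M + 1) = initN M ++ [0] := by
  unfold initN
  rw [List.replicate_succ' (n := M)]
  rw [List.set_append]
  have h1 : 1 < (List.replicate M (0:Int)).length := by simp; omega
  rw [if_pos h1, List.set_append]
  have h2 : 2 < ((List.replicate M (0:Int)).set 1 1).length := by simp; omega
  rw [if_pos h2]

-- chain value: for j ≠ 0, chainLen j 0 = chainLen (j % popcount j) 0 + 1
theorem chainLen_unfold (j : Nat) (h : j ≠ 0) :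
    chainLen j 0 = chainLen (j % PySem.Int.bitCount (j : Int)) 0 + 1 := by
  rw [chainLen_step j 0 h, chainLen_shift]
  ring

-- MAIN INVARIANT: folding A's loop over range(3, 3+k) on the size-(3+k) initial table
-- yields the table of chain lengths
theorem fold_eq_chains (k : Nat) :
    (PySem.List.pyRange 3 (3 + (k : Int)) 1).foldl stepA (initN (3 + k))
      = (List.range (3 + k)).map (fun j => chainLen j 0) := by
  induction k with
  | zero =>
    simp only [Nat.cast_zero, add_zero]
    rw [PySem.List.pyRange_one_eq_nil (by omega)]
    rw [show List.range 3 = [0, 1, 2] from by decide]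
    rw [List.foldl_nil]
    simp only [List.map_cons, List.map_nil]
    rw [chainLen_zero,
        chainLen_step 1 0 (by decide), show (1 : Nat) % PySem.Int.bitCount ((1:Nat) : Int) = 0 from by decide, chainLen_zero,
        chainLen_step 2 0 (by decide), show (2 : Nat) % PySem.Int.bitCount ((2:Nat) : Int) = 0 from by decide, chainLen_zero]
    decide
  | succ k ih =>
    have hcast : (3 : Int) + ((k : Nat) + 1 : Nat) = (3 + (k : Int)) + 1 := by push_cast; ring
    rw [hcast, PySem.List.pyRange_one_succ_right (by omega)]
    have hM : 3 + (k + 1) = (3 + k) + 1 := by omega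
    rw [hM, initN_succ (3 + k) (by omega)]
    rw [List.foldl_append]
    rw [foldl_stepA_append _ _ _ (fun i hi => by
      rw [PySem.List.mem_pyRange_one] at hi
      constructor
      · exact hi.1
      · unfold initN; simp only [List.length_set, List.length_replicate]; exact_mod_cast hi.2)]
    rw [ih]
    -- the final step at i = 3+k
    set i : Int := 3 + (k : Int) with hi
    have hi1 : (1:Int) ≤ i := by omega
    obtain ⟨hm0, hmi⟩ := modpc_bounds i hi1
    rw [List.foldl_cons, List.foldl_nil]
    unfold stepA
    have hlen : ((List.range (3 + k)).map (fun j => chainLen j 0)).length = 3 + k := by simp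
    -- the read: table[m] = chainLen m 0
    have hmN : (PySem.Int.mod i (popcountA i)).toNat < 3 + k := by omega
    have hget : PySem.List.pyGetD ((List.range (3 + k)).map (fun j => chainLen j 0) ++ [0])
        (PySem.Int.mod i (popcountA i)) 0 = chainLen (PySem.Int.mod i (popcountA i)).toNat 0 := by
      rw [PySem.List.pyGetD_of_nonneg _ _ hm0]
      rw [List.getD_eq_getElem?_getD, List.getElem?_append_left (by simpa using hmN)]
      simp [List.getElem?_range hmN]
    rw [hget]
    -- the write: set at index 3+k replaces the trailing 0
    rw [PySem.List.pySetD_of_nonneg _ _ (by omega : (0:Int) ≤ i)]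
    have hidx : i.toNat = 3 + k := by omega
    rw [List.set_append]
    rw [hlen, hidx, if_neg (lt_irrefl (3 + k)), Nat.sub_self]
    rw [List.range_succ, List.map_append]
    congr 1
    simp only [List.set_cons_zero, List.map_cons, List.map_nil]
    congr 1
    -- chainLen (3+k) 0 = chainLen m 0 + 1
    have hne : (3 + k) ≠ 0 := by omega
    rw [chainLen_unfold (3 + k) hne]
    congr 2
    -- m.toNat = (3+k) % bitCount(3+k)
    have hmod : PySem.Int.mod i (popcountA i) = (((3 + k) % PySem.Int.bitCount ((3 + k : Nat) : Int) : Nat) : Int) := by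
      unfold popcountA
      have hcast2 : i = (((3 + k : Nat)) : Int) := by rw [hi]; push_cast; ring
      rw [hcast2]
      exact PySem.Int.mod_natCast (3 + k) (PySem.Int.bitCount (((3 + k : Nat)) : Int))
    rw [hmod, Int.toNat_natCast]

-- B's port equals the chain table
theorem alt_eq_chains (n : Int) (_h : 0 ≤ n + 1) :
    makeFtbl_alt n = (List.range (n + 1).toNat).map (fun j => chainLen j 0) := by
  unfold makeFtbl_alt
  rw [PySem.List.pyRange_one]
  rw [List.map_map]
  simp only [sub_zero]
  apply List.map_congr_left
  intro a _
  simp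

-- ===== VERDICT (by name: the statement is the Claim_ definition above) =====
theorem makeFtbl_spec : Claim_equal_makeFtbl := by
  intro n _ hpre
  unfold Spec_makeFtbl
  have hk : ∃ k : Nat, n + 1 = 3 + (k : Int) := ⟨(n - 2).toNat, by unfold Pre_makeFtbl at hpre; omega⟩
  obtain ⟨k, hkeq⟩ := hk
  rw [makeFtbl_eq_fold, alt_eq_chains n (by omega), hkeq]
  have hM : ((3 : Int) + (k : Int)).toNat = 3 + k := by omega
  rw [hM]
  have hinit : PySem.List.pySetD (PySem.List.pySetD (List.replicate (3 + k) (0 : Int)) 1 1) 2 1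
      = initN (3 + k) := by
    rw [PySem.List.pySetD_of_nonneg _ _ (by omega : (0:Int) ≤ 1),
        PySem.List.pySetD_of_nonneg _ _ (by omega : (0:Int) ≤ 2)]
    unfold initN
    rw [show (1:Int).toNat = 1 from rfl, show (2:Int).toNat = 2 from rfl]
  rw [hinit, fold_eq_chains k]
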